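-- pv_equiv track=rewrite | github.com/Alvaropz/Python_problems_BinarySearch | 1. Easy/remove_last_duplicate_entries/remove_last_duplicate_entries.py | remove_last_duplicate_entries_list_index
-- ===== SOURCE A (Python) =====
-- from collections import Counter
--
-- def remove_last_duplicate_entries_list_index(nums):
--     set_values = set()
--     dict_track_duplicates = Counter(nums)
--     list_indexes = []
--     for index, value in reversed(list(enumerate(nums))):
--         if not value in set_values and dict_track_duplicates[value] > 1:
--             list_indexes.append(index)
--             set_values.add(value)
--     for value in list_indexes:
--         del nums[value]
--     return nums
-- ===== SOURCE B (Python) =====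
-- from collections import Counter
--
-- def remove_last_duplicate_entries_list_index(nums):
--     last = {v: i for i, v in enumerate(nums)}
--     counts = Counter(nums)
--     to_remove = {last[v] for v, c in counts.items() if c > 1}
--     nums[:] = [v for i, v in enumerate(nums) if i not in to_remove]
--     return nums
-- ===== Notes on version B (the rewrite author's own statement) =====
-- stated objective: simpler
-- what changed: Replaces A's reverse seen-set scan collecting indices plus a loop of in-place 'del nums[i]' deletions by a forward value-to-last-index dict, a set of last indices of duplicated values, and one filtering rebuild of the list.
import Mathlib
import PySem

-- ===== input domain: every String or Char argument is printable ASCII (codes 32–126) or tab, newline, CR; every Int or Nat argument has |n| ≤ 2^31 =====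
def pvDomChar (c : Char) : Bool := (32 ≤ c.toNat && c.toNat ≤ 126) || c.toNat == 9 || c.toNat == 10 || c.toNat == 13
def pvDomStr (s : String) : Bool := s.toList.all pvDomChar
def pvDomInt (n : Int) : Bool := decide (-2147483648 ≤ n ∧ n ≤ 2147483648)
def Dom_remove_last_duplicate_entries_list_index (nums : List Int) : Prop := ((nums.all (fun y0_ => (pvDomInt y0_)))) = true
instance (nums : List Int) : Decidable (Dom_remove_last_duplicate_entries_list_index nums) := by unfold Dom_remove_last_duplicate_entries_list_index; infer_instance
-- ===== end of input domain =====

-- B replaces A's reverse seen-set scan plus in-place index deletions by a value→last-index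
-- dict and a single filtering rebuild (simpler decomposition; both mutate the argument in
-- place in Python — the theorems below are about the returned value).

-- ===== PORT A =====
def remove_last_duplicate_entries_list_index (nums : List Int) : List Int :=
  let dict_track_duplicates := PySem.Dict.counter nums
  let st := (PySem.List.enumerate nums).reverse.foldl
    (fun (st : PySem.Set Int × List Int) iv =>
      if ¬ (PySem.Set.contains st.1 iv.2 = true) ∧ dict_track_duplicates.getD iv.2 0 > 1 then
        (PySem.Set.add st.1 iv.2, st.2 ++ [iv.1])
      else st)
    (PySem.Set.empty, [])
  -- 'for value in list_indexes: del nums[value]' — pop? is Python's del; the indices are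
  -- always in range, so the 'none' (IndexError) branch is never taken
  st.2.foldl (fun acc i =>
    match PySem.List.pop? acc i with
    | some r => r.2
    | none => acc) nums

-- ===== PORT B =====
def remove_last_duplicate_entries_list_index_alt (nums : List Int) : List Int :=
  let last := (PySem.List.enumerate nums).foldl
    (fun (d : PySem.Dict Int Int) iv => d.insert iv.2 iv.1) PySem.Dict.empty
  let counts := PySem.Dict.counter nums
  -- 'last[v]' never misses (every counted value was enumerated); getD 0 totalises the lookup
  let to_remove := counts.items.foldl
    (fun (s : PySem.Set Int) vc => if vc.2 > 1 then PySem.Set.add s (last.getD vc.1 0) else s)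
    PySem.Set.empty
  ((PySem.List.enumerate nums).filter
    (fun iv => !(PySem.Set.contains to_remove iv.1))).map (·.2)

-- ===== PRECONDITION & SPEC =====
def Spec_remove_last_duplicate_entries_list_index (nums : List Int) (out : List Int) : Prop := out = remove_last_duplicate_entries_list_index_alt nums
instance (nums : List Int) (out : List Int) : Decidable (Spec_remove_last_duplicate_entries_list_index nums out) := by unfold Spec_remove_last_duplicate_entries_list_index; infer_instance

-- ===== CLAIM (what is proved, stated in full; the proofs are below) =====
def Claim_equal_remove_last_duplicate_entries_list_index : Prop := ∀ (nums : List Int), Dom_remove_last_duplicate_entries_list_index nums → Spec_remove_last_duplicate_entries_list_index nums (remove_last_duplicate_entries_list_index nums)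

-- ===== LEMMAS AND PROOFS =====

/-- The per-index removal test both programs implement: position `p.1` (a valid index of
`N`, as produced by `enumerate`) holds a duplicated value that occurs nowhere later. -/
def remTest (N : List Int) (p : Int × Int) : Bool :=
  decide (N.count p.2 > 1) && decide (p.2 ∉ N.drop (p.1.toNat + 1))

/-- The common normal form of both outputs. -/
def keepFilter (N : List Int) : List Int :=
  ((PySem.List.enumerate N).filter (fun p => !(remTest N p))).map (·.2)

theorem lastfold_spec (xs : List Int) (v : Int) (hv : v ∈ xs) :
    ∃ k : Nat, k < xs.length ∧
      ((PySem.List.enumerate xs).foldl (fun (d : PySem.Dict Int Int) iv => d.insert iv.2 iv.1) PySem.Dict.empty).getD v 0 = (k : Int) ∧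
      xs[k]? = some v ∧ v ∉ xs.drop (k+1) := by
  induction xs using List.reverseRecOn with
  | nil => simp at hv
  | append_singleton ys x ih =>
    rw [PySem.List.enumerate_append, List.foldl_append]
    simp only [PySem.List.enumerate_cons, PySem.List.enumerate_nil, List.foldl_cons, List.foldl_nil]
    by_cases hvx : v = x
    · subst hvx
      refine ⟨ys.length, by simp, ?_, ?_, ?_⟩
      · rw [PySem.Dict.getD_insert_self]; ring
      · simp
      · rw [show ys.length + 1 = (ys ++ [v]).length by simp, List.drop_length]; simp
    · have hvy : v ∈ ys := by
        rcases List.mem_append.mp hv with h | h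
        · exact h
        · simp at h; exact absurd h hvx
      obtain ⟨k, hk, hget, hidx, hdrop⟩ := ih hvy
      refine ⟨k, by simp; omega, ?_, ?_, ?_⟩
      · rw [PySem.Dict.getD_insert_of_ne _ _ _ hvx]; exact hget
      · rw [List.getElem?_append_left hk]; exact hidx
      · rw [List.drop_append_of_le_length (by omega)]
        simp only [List.mem_append, List.mem_singleton]
        rintro (h | h)
        · exact hdrop h
        · exact hvx h

theorem last_unique (xs : List Int) (k1 k2 : Nat) (h1 : k1 < xs.length) (h2 : k2 < xs.length)
    (e : xs[k1] = xs[k2]) (n1 : xs[k1] ∉ xs.drop (k1+1)) (n2 : xs[k2] ∉ xs.drop (k2+1)) :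
    k1 = k2 := by
  rcases Nat.lt_trichotomy k1 k2 with h | h | h
  · exfalso
    apply n1
    rw [e]
    have hlen : k2 - (k1+1) < (xs.drop (k1+1)).length := by simp [List.length_drop]; omega
    have : xs[k2] = (xs.drop (k1+1))[k2 - (k1+1)]'hlen := by
      rw [List.getElem_drop]; congr 1; omega
    rw [this]; exact List.getElem_mem _
  · exact h
  · exfalso
    apply n2
    rw [← e]
    have hlen : k1 - (k2+1) < (xs.drop (k2+1)).length := by simp [List.length_drop]; omega
    have : xs[k1] = (xs.drop (k2+1))[k1 - (k2+1)]'hlen := by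
      rw [List.getElem_drop]; congr 1; omega
    rw [this]; exact List.getElem_mem _

theorem mem_foldl_add_if (f : Int × Int → Int) :
    ∀ (l : List (Int × Int)) (s : PySem.Set Int) (x : Int),
    (x ∈ l.foldl (fun s p => if p.2 > 1 then PySem.Set.add s (f p) else s) s) ↔
      x ∈ s ∨ ∃ p ∈ l, p.2 > 1 ∧ x = f p := by
  intro l
  induction l with
  | nil => simp
  | cons p r ih =>
    intro s x
    simp only [List.foldl_cons]
    by_cases hp : p.2 > 1
    · rw [if_pos hp, ih, PySem.Set.mem_add]
      constructor
      · rintro (⟨h | h⟩ | ⟨q, hq, h1, h2⟩)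
        · exact Or.inl h
        · exact Or.inr ⟨p, by simp, hp, h⟩
        · exact Or.inr ⟨q, by simp [hq], h1, h2⟩
      · rintro (h | ⟨q, hq, h1, h2⟩)
        · exact Or.inl (Or.inl h)
        · rcases List.mem_cons.mp hq with rfl | hq
          · exact Or.inl (Or.inr h2)
          · exact Or.inr ⟨q, hq, h1, h2⟩
    · rw [if_neg hp, ih]
      constructor
      · rintro (h | ⟨q, hq, h1, h2⟩)
        · exact Or.inl h
        · exact Or.inr ⟨q, by simp [hq], h1, h2⟩
      · rintro (h | ⟨q, hq, h1, h2⟩)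
        · exact Or.inl h
        · rcases List.mem_cons.mp hq with rfl | hq
          · exact absurd h1 hp
          · exact Or.inr ⟨q, hq, h1, h2⟩

def goA (d : PySem.Dict Int Int) : List (Int × Int) → PySem.Set Int → List Int
  | [], _ => []
  | p :: r, s =>
    if ¬ (PySem.Set.contains s p.2 = true) ∧ d.getD p.2 0 > 1 then
      p.1 :: goA d r (PySem.Set.add s p.2)
    else goA d r s

theorem foldA_eq_goA (d : PySem.Dict Int Int) :
    ∀ (ps : List (Int × Int)) (s : PySem.Set Int) (acc : List Int),
    (ps.foldl (fun (st : PySem.Set Int × List Int) iv =>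
      if ¬ (PySem.Set.contains st.1 iv.2 = true) ∧ d.getD iv.2 0 > 1 then
        (PySem.Set.add st.1 iv.2, st.2 ++ [iv.1]) else st) (s, acc)).2
    = acc ++ goA d ps s := by
  intro ps
  induction ps with
  | nil => simp [goA]
  | cons p r ih =>
    intro s acc
    rw [List.foldl_cons, goA]
    by_cases h : ¬ (PySem.Set.contains s p.2 = true) ∧ d.getD p.2 0 > 1
    · rw [if_pos h, if_pos h, ih]; simp
    · rw [if_neg h, if_neg h, ih]

theorem goA_spec (N : List Int) :
    ∀ (xs rest : List Int), xs ++ rest = N →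
    ∀ s : PySem.Set Int, (∀ v, PySem.Set.contains s v = true ↔ (v ∈ rest ∧ N.count v > 1)) →
    goA (PySem.Dict.counter N) ((PySem.List.enumerate xs).reverse) s
      = (((PySem.List.enumerate xs).filter (remTest N)).reverse).map (·.1) := by
  intro xs
  induction xs using List.reverseRecOn with
  | nil => intro rest h s hs; simp [goA, PySem.List.enumerate_nil]
  | append_singleton ys x ih =>
    intro rest h s hs
    have hdrop1 : N.drop (ys.length + 1) = rest := by
      rw [← h]; rw [show ys ++ [x] ++ rest = (ys ++ [x]) ++ rest by simp]
      exact List.drop_left' (by simp)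
    rw [PySem.List.enumerate_append]
    simp only [PySem.List.enumerate_cons, PySem.List.enumerate_nil, zero_add]
    rw [List.reverse_append, List.filter_append]
    simp only [List.reverse_cons, List.reverse_nil, List.nil_append, List.singleton_append]
    have hcnt : (PySem.Dict.counter N).getD x 0 = ((N.count x : Int)) := PySem.Dict.getD_counter N x
    have hrem : remTest N ((ys.length : Int), x) = decide (N.count x > 1 ∧ x ∉ rest) := by
      simp [remTest, hdrop1]
    by_cases hc : N.count x > 1 ∧ x ∉ rest
    · have hcon : ¬ (PySem.Set.contains s x = true) := by
        rw [hs]; rintro ⟨h1, _⟩; exact hc.2 h1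
      rw [goA, if_pos ⟨hcon, by rw [hcnt]; exact_mod_cast hc.1⟩]
      have hinv : ∀ v, PySem.Set.contains (PySem.Set.add s x) v = true ↔ (v ∈ x :: rest ∧ N.count v > 1) := by
        intro v
        rw [PySem.Set.contains_iff, PySem.Set.mem_add, ← PySem.Set.contains_iff, List.mem_cons]
        constructor
        · rintro (hv | rfl)
          · obtain ⟨h1, h2⟩ := (hs v).mp hv; exact ⟨Or.inr h1, h2⟩
          · exact ⟨Or.inl rfl, hc.1⟩
        · rintro ⟨(rfl | h1), h2⟩
          · exact Or.inr rfl
          · exact Or.inl ((hs v).mpr ⟨h1, h2⟩)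
      rw [ih (x :: rest) (by simpa using h) (PySem.Set.add s x) hinv]
      rw [List.filter_cons_of_pos (by rw [hrem]; exact decide_eq_true hc), List.filter_nil]
      simp
    · have hcond : ¬ (¬ (PySem.Set.contains s x = true) ∧ (PySem.Dict.counter N).getD x 0 > 1) := by
        rintro ⟨h1, h2⟩
        rw [hcnt] at h2
        have hcx : N.count x > 1 := by exact_mod_cast h2
        have hxr : x ∈ rest := by
          by_contra hn; exact hc ⟨hcx, hn⟩
        exact h1 ((hs x).mpr ⟨hxr, hcx⟩)
      rw [goA, if_neg hcond]
      have hinv : ∀ v, PySem.Set.contains s v = true ↔ (v ∈ x :: rest ∧ N.count v > 1) := by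
        intro v
        rw [hs, List.mem_cons]
        constructor
        · rintro ⟨h1, h2⟩; exact ⟨Or.inr h1, h2⟩
        · rintro ⟨(rfl | h1), h2⟩
          · refine ⟨?_, h2⟩
            by_contra hn; exact hc ⟨h2, hn⟩
          · exact ⟨h1, h2⟩
      rw [ih (x :: rest) (by simpa using h) s hinv]
      rw [List.filter_cons_of_neg (by rw [hrem]; simpa using hc), List.filter_nil]
      simp

theorem del_fold :
    ∀ (ds : List Int) (xs : List Int),
    (∀ i ∈ ds, ∃ k : Nat, i = (k : Int) ∧ k < xs.length) →
    ds.Pairwise (fun a b => b < a) →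
    ds.foldl (fun acc i => match PySem.List.pop? acc i with
      | some r => r.2
      | none => acc) xs
    = ((PySem.List.enumerate xs).filter (fun p => decide (p.1 ∉ ds))).map (·.2) := by
  intro ds
  induction ds with
  | nil =>
    intro xs _ _
    simp [PySem.List.map_snd_enumerate]
  | cons i ds' ih =>
    intro xs hrange hpw
    obtain ⟨k, rfl, hk⟩ := hrange i (by simp)
    have hall : ∀ j ∈ ds', j < (k : Int) := fun j hj => (List.pairwise_cons.mp hpw).1 j hj
    have hpw' : ds'.Pairwise (fun a b => b < a) := (List.pairwise_cons.mp hpw).2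
    rw [List.foldl_cons]
    rw [PySem.List.pop?_natCast xs k hk]
    have hrange' : ∀ i ∈ ds', ∃ k' : Nat, i = (k' : Int) ∧ k' < (xs.eraseIdx k).length := by
      intro j hj
      obtain ⟨k', rfl, _⟩ := hrange j (by simp [hj])
      have : (k' : Int) < (k : Int) := hall _ hj
      exact ⟨k', rfl, by rw [List.length_eraseIdx_of_lt hk]; omega⟩
    rw [ih (xs.eraseIdx k) hrange' hpw']
    -- both sides as take/drop decompositions
    rw [List.eraseIdx_eq_take_drop_succ]
    conv_rhs => rw [show xs = xs.take k ++ xs.drop k from (List.take_append_drop k xs).symm,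
      List.drop_eq_getElem_cons hk]
    rw [PySem.List.enumerate_append, PySem.List.enumerate_append]
    have hlen : (xs.take k).length = k := List.length_take_of_le (by omega)
    rw [hlen]
    simp only [PySem.List.enumerate_cons, zero_add]
    rw [List.filter_append, List.filter_append, List.map_append, List.map_append]
    congr 1
    · -- take part: indices < k, so membership in ds' and in ↑k :: ds' agree
      congr 1
      apply List.filter_congr
      intro p hp
      obtain ⟨k₀, hk₀, rfl⟩ := (PySem.List.mem_enumerate_iff _ _ _).mp hp
      rw [hlen] at hk₀
      have hne : ((k₀ : Int)) ≠ (k : Int) := by omega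
      simp only [decide_eq_decide, List.mem_cons, zero_add]
      tauto
    · -- drop part: all indices > every element of ↑k :: ds', so both filters keep everything
      rw [List.filter_cons_of_neg (by simp)]
      have h1 : List.filter (fun p => decide (p.1 ∉ ds')) (PySem.List.enumerate (List.drop (k+1) xs) ↑k)
          = PySem.List.enumerate (List.drop (k+1) xs) ↑k := List.filter_eq_self.mpr (by
        intro p hp
        obtain ⟨k₀, hk₀, rfl⟩ := (PySem.List.mem_enumerate_iff _ _ _).mp hp
        simp only [decide_eq_true_eq]
        intro h
        have := hall _ h; omega)
      have h2 : List.filter (fun p => decide (p.1 ∉ ((k:Int) :: ds' : List Int))) (PySem.List.enumerate (List.drop (k+1) xs) ((k:Int)+1))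
          = PySem.List.enumerate (List.drop (k+1) xs) ((k:Int)+1) := List.filter_eq_self.mpr (by
        intro p hp
        obtain ⟨k₀, hk₀, rfl⟩ := (PySem.List.mem_enumerate_iff _ _ _).mp hp
        simp only [decide_eq_true_eq, List.mem_cons]
        rintro (h | h)
        · omega
        · have := hall _ h; omega)
      rw [h1, h2, PySem.List.map_snd_enumerate, PySem.List.map_snd_enumerate]

theorem remove_last_duplicate_entries_list_index_B_eq (nums : List Int) :
    remove_last_duplicate_entries_list_index_alt nums = keepFilter nums := by
  unfold remove_last_duplicate_entries_list_index_alt keepFilter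
  dsimp only
  congr 1
  apply List.filter_congr
  intro p hp
  obtain ⟨k, hk, rfl⟩ := (PySem.List.mem_enumerate_iff _ _ _).mp hp
  congr 1
  rw [Bool.eq_iff_iff, PySem.Set.contains_iff, mem_foldl_add_if]
  simp only [PySem.Dict.items_counter, List.mem_map, PySem.Set.mem_ofList, remTest,
    zero_add, Int.toNat_natCast, Bool.and_eq_true, decide_eq_true_eq, PySem.Set.empty]
  constructor
  · rintro (h | ⟨p, ⟨w, hw, rfl⟩, h1, h2⟩)
    · simp at h
    · obtain ⟨k', hk', hget, hidx, hdrop⟩ := lastfold_spec nums w hw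
      rw [hget] at h2
      have hkk : k = k' := by exact_mod_cast h2
      subst hkk
      have : nums[k] = w := by
        have := List.getElem?_eq_getElem hk' ▸ hidx; simpa using this
      subst this
      exact ⟨by exact_mod_cast (show ((List.count nums[k] nums : Int)) > 1 from h1), hdrop⟩
  · rintro ⟨h1, h2⟩
    refine Or.inr ⟨_, ⟨nums[k], List.getElem_mem hk, rfl⟩, show ((List.count nums[k] nums : Int)) > 1 by exact_mod_cast h1, ?_⟩
    obtain ⟨k', hk', hget, hidx, hdrop⟩ := lastfold_spec nums nums[k] (List.getElem_mem hk)
    have hv : nums[k'] = nums[k] := by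
      have := List.getElem?_eq_getElem hk' ▸ hidx; simpa using this
    have : k = k' := last_unique nums k k' hk hk' (by rw [hv]) h2 (by rw [hv]; exact hdrop)
    rw [hget, this]

theorem remove_last_duplicate_entries_list_index_A_eq (nums : List Int) :
    remove_last_duplicate_entries_list_index nums = keepFilter nums := by
  unfold remove_last_duplicate_entries_list_index
  dsimp only
  rw [foldA_eq_goA, List.nil_append]
  rw [goA_spec nums nums [] (by simp) PySem.Set.empty
    (by intro v; simp [PySem.Set.empty])]
  set L := (((PySem.List.enumerate nums).filter (remTest nums)).reverse).map (fun x => x.1) with hL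
  have hrange : ∀ i ∈ L, ∃ k : Nat, i = (k : Int) ∧ k < nums.length := by
    intro i hi
    obtain ⟨q, hq, rfl⟩ := List.mem_map.mp hi
    rw [List.mem_reverse] at hq
    obtain ⟨hqE, _⟩ := List.mem_filter.mp hq
    obtain ⟨k, hk, rfl⟩ := (PySem.List.mem_enumerate_iff _ _ _).mp hqE
    exact ⟨k, by omega, hk⟩
  have hpw : L.Pairwise (fun a b => b < a) := by
    rw [hL, List.pairwise_map, List.pairwise_reverse]
    exact List.Pairwise.filter _ (PySem.List.pairwise_lt_enumerate nums 0)
  rw [del_fold L nums hrange hpw]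
  unfold keepFilter
  congr 1
  apply List.filter_congr
  intro p hp
  obtain ⟨k, hk, rfl⟩ := (PySem.List.mem_enumerate_iff _ _ _).mp hp
  have key : ((0:Int) + (k:Int) ∈ L) ↔ remTest nums ((0:Int)+(k:Int), nums[k]) = true := by
    constructor
    · intro h
      obtain ⟨q, hq, hq1⟩ := List.mem_map.mp h
      rw [List.mem_reverse] at hq
      obtain ⟨hqE, hqT⟩ := List.mem_filter.mp hq
      obtain ⟨k', hk', rfl⟩ := (PySem.List.mem_enumerate_iff _ _ _).mp hqE
      have : k' = k := by simp at hq1; omega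
      subst this
      exact hqT
    · intro h
      exact List.mem_map.mpr ⟨((0:Int)+(k:Int), nums[k]),
        List.mem_reverse.mpr (List.mem_filter.mpr ⟨hp, h⟩), rfl⟩
  rw [Bool.eq_iff_iff]
  simp only [zero_add] at key
  simp [key]

-- ===== VERDICT (by name: the statement is the Claim_ definition above) =====
theorem remove_last_duplicate_entries_list_index_spec : Claim_equal_remove_last_duplicate_entries_list_index := by
  intro nums _
  unfold Spec_remove_last_duplicate_entries_list_index
  rw [remove_last_duplicate_entries_list_index_A_eq, remove_last_duplicate_entries_list_index_B_eq]
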